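-- pv_equiv track=rewrite | github.com/crescentln/new-project | ruleset/scripts/build_rulesets.py | split_rules
-- ===== SOURCE A (Python) =====
-- def split_rules(rules: list[str]) -> tuple[list[str], list[str], list[str], list[str], list[str]]:
--     non_ip_rules: list[str] = []
--     ip_rules: list[str] = []
--     domain_rules: list[str] = []
--     ipcidr_payloads: list[str] = []
--     surge_domainset_lines: list[str] = []
--
--     for rule in rules:
--         if rule.startswith(("IP-CIDR,", "IP-CIDR6,")):
--             ip_rules.append(rule)
--             parts = rule.split(",", 2)
--             if len(parts) >= 2:
--                 ipcidr_payloads.append(parts[1])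
--             continue
--
--         non_ip_rules.append(rule)
--
--         if rule.startswith("DOMAIN,"):
--             domain = rule.split(",", 1)[1]
--             domain_rules.append(domain)
--             surge_domainset_lines.append(domain)
--             continue
--
--         if rule.startswith("DOMAIN-SUFFIX,"):
--             domain = rule.split(",", 1)[1]
--             domain_rules.append(f"+.{domain}")
--             surge_domainset_lines.append(f".{domain}")
--
--     return non_ip_rules, ip_rules, domain_rules, ipcidr_payloads, surge_domainset_lines
-- ===== SOURCE B (Python) =====
-- def split_rules(rules: list[str]) -> tuple[list[str], list[str], list[str], list[str], list[str]]:
--     def is_ip(r):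
--         return r.startswith("IP-CIDR,") or r.startswith("IP-CIDR6,")
--
--     ip_rules = [r for r in rules if is_ip(r)]
--     non_ip_rules = [r for r in rules if not is_ip(r)]
--     ipcidr_payloads = [p[1] for p in (r.split(",", 2) for r in ip_rules) if len(p) >= 2]
--     dom = [r for r in non_ip_rules
--            if r.startswith("DOMAIN,") or r.startswith("DOMAIN-SUFFIX,")]
--     domain_rules = [r.split(",", 1)[1] if r.startswith("DOMAIN,")
--                     else "+." + r.split(",", 1)[1] for r in dom]
--     surge_domainset_lines = [r.split(",", 1)[1] if r.startswith("DOMAIN,")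
--                              else "." + r.split(",", 1)[1] for r in dom]
--     return non_ip_rules, ip_rules, domain_rules, ipcidr_payloads, surge_domainset_lines
-- ===== Notes on version B (the rewrite author's own statement) =====
-- stated objective: alternative
-- what changed: The single interleaved loop building five lists at once is replaced by independent order-preserving passes: filters for ip/non-ip, a filterMap over the IP rules for payloads, and maps over the filtered domain rules for the two domain outputs.
import Mathlib
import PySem

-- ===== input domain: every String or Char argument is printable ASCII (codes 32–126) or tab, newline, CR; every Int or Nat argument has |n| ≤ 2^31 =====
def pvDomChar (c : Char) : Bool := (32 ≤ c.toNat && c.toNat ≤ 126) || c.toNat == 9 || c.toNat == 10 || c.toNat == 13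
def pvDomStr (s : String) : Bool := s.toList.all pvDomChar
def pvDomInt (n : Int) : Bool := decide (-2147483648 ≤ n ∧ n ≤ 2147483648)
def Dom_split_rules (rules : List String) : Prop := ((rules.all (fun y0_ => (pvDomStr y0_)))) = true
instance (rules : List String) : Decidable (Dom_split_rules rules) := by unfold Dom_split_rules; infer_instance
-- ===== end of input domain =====

-- B replaces A's single five-accumulator loop by independent filter/map/filterMap passes (objective: alternative decomposition, same cost).

-- ===== PORT A =====
-- A's loop, transliterated: one pass, five accumulators, branches in source order.
def split_rules_loop (rules : List String) (nonIp ip dom pay surge : List String) :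
    List String × List String × List String × List String × List String :=
  match rules with
  | [] => (nonIp, ip, dom, pay, surge)
  | r :: rest =>
    if PySem.Str.startswith r "IP-CIDR," || PySem.Str.startswith r "IP-CIDR6," then
      -- parts = rule.split(",", 2); if len(parts) >= 2: append parts[1]
      let parts := (PySem.Str.splitMax? r "," 2).getD []
      if 2 ≤ parts.length then
        split_rules_loop rest nonIp (ip ++ [r]) dom (pay ++ [parts.getD 1 ""]) surge
      else
        split_rules_loop rest nonIp (ip ++ [r]) dom pay surge
    else if PySem.Str.startswith r "DOMAIN," then
      -- domain = rule.split(",", 1)[1]  (index 1 exists since the prefix contains ",")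
      let d := ((PySem.Str.splitMax? r "," 1).getD []).getD 1 ""
      split_rules_loop rest (nonIp ++ [r]) ip (dom ++ [d]) pay (surge ++ [d])
    else if PySem.Str.startswith r "DOMAIN-SUFFIX," then
      let d := ((PySem.Str.splitMax? r "," 1).getD []).getD 1 ""
      split_rules_loop rest (nonIp ++ [r]) ip (dom ++ ["+." ++ d]) pay (surge ++ ["." ++ d])
    else
      split_rules_loop rest (nonIp ++ [r]) ip dom pay surge

def split_rules (rules : List String) : List String × List String × List String × List String × List String :=
  split_rules_loop rules [] [] [] [] []

-- ===== PORT B =====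
def pvIsIp (r : String) : Bool :=
  PySem.Str.startswith r "IP-CIDR," || PySem.Str.startswith r "IP-CIDR6,"

-- r.split(",", 1)[1]  (index 1 exists whenever a "DOMAIN"-prefixed rule is reached)
def pvRuleDomain (r : String) : String :=
  ((PySem.Str.splitMax? r "," 1).getD []).getD 1 ""

def split_rules_alt (rules : List String) : List String × List String × List String × List String × List String :=
  let ip_rules := rules.filter pvIsIp
  let non_ip_rules := rules.filter (fun r => !pvIsIp r)
  let ipcidr_payloads :=
    (ip_rules.map (fun r => (PySem.Str.splitMax? r "," 2).getD [])).filterMap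
      (fun p => if 2 ≤ p.length then some (p.getD 1 "") else none)
  let dom := non_ip_rules.filter
      (fun r => PySem.Str.startswith r "DOMAIN," || PySem.Str.startswith r "DOMAIN-SUFFIX,")
  let domain_rules := dom.map
      (fun r => if PySem.Str.startswith r "DOMAIN," then pvRuleDomain r else "+." ++ pvRuleDomain r)
  let surge_domainset_lines := dom.map
      (fun r => if PySem.Str.startswith r "DOMAIN," then pvRuleDomain r else "." ++ pvRuleDomain r)
  (non_ip_rules, ip_rules, domain_rules, ipcidr_payloads, surge_domainset_lines)

-- ===== PRECONDITION & SPEC =====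
def Spec_split_rules (rules : List String) (out : List String × List String × List String × List String × List String) : Prop := out = split_rules_alt rules
instance (rules : List String) (out : List String × List String × List String × List String × List String) : Decidable (Spec_split_rules rules out) := by unfold Spec_split_rules; infer_instance

-- ===== CLAIM (what is proved, stated in full; the proofs are below) =====
def Claim_equal_split_rules : Prop := ∀ (rules : List String), Dom_split_rules rules → Spec_split_rules rules (split_rules rules)

-- ===== LEMMAS AND PROOFS =====
theorem split_rules_loop_spec (rules : List String) :
    ∀ nonIp ip dom pay surge,
      split_rules_loop rules nonIp ip dom pay surge =
        (nonIp ++ (split_rules_alt rules).1,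
         ip ++ (split_rules_alt rules).2.1,
         dom ++ (split_rules_alt rules).2.2.1,
         pay ++ (split_rules_alt rules).2.2.2.1,
         surge ++ (split_rules_alt rules).2.2.2.2) := by
  induction rules with
  | nil => intro n i d p s; simp [split_rules_loop, split_rules_alt]
  | cons r rest ih =>
    intro n i d p s
    simp only [split_rules_loop, split_rules_alt, List.filter_cons]
    by_cases hip : pvIsIp r
    · simp only [pvIsIp] at hip
      simp only [hip, if_pos, Bool.not_true, pvIsIp]
      by_cases hlen : 2 ≤ ((PySem.Str.splitMax? r "," 2).getD []).length
      · simp [hlen, ih, split_rules_alt, pvIsIp, List.append_assoc]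
      · simp [hlen, ih, split_rules_alt, pvIsIp, List.append_assoc]
    · simp only [pvIsIp, Bool.or_eq_true, not_or, Bool.not_eq_true] at hip
      obtain ⟨h1, h2⟩ := hip
      have h1' : PySem.Chars.startswith r.toList ['I','P','-','C','I','D','R',','] = false := h1
      have h2' : PySem.Chars.startswith r.toList ['I','P','-','C','I','D','R','6',','] = false := h2
      by_cases hd : PySem.Str.startswith r "DOMAIN,"
      · have hd' : PySem.Chars.startswith r.toList ['D','O','M','A','I','N',','] = true := hd
        simp [h1', h2', hd', ih, split_rules_alt, pvIsIp, pvRuleDomain, List.append_assoc]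
      · have hd' : PySem.Chars.startswith r.toList ['D','O','M','A','I','N',','] = false :=
          Bool.not_eq_true _ ▸ eq_false_of_ne_true hd
        by_cases hs : PySem.Str.startswith r "DOMAIN-SUFFIX,"
        · have hs' : PySem.Chars.startswith r.toList ['D','O','M','A','I','N','-','S','U','F','F','I','X',','] = true := hs
          simp [h1', h2', hd', hs', ih, split_rules_alt, pvIsIp, pvRuleDomain, List.append_assoc]
        · have hs' : PySem.Chars.startswith r.toList ['D','O','M','A','I','N','-','S','U','F','F','I','X',','] = false :=
            eq_false_of_ne_true hs
          simp [h1', h2', hd', hs', ih, split_rules_alt, pvIsIp, List.append_assoc]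

-- ===== VERDICT (by name: the statement is the Claim_ definition above) =====
theorem split_rules_spec : Claim_equal_split_rules := by
  intro rules _
  unfold Spec_split_rules split_rules
  simp [split_rules_loop_spec]
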